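-- pv_equiv track=rewrite | github.com/mayasss-gif/BiRAGAS-Unified-Application | agentic_ai_wf/ipaa_causality/run_engine2_3_mechanistic.py | _bfs_upstream
-- ===== SOURCE A (Python) =====
-- from collections import deque
-- from typing import Dict, List, Optional, Set, Tuple
--
-- def _bfs_upstream(incoming: Dict[str, List[Tuple[str, int]]], tf: str, max_steps: int) -> Dict[Tuple[str, int], int]:
--     best: Dict[Tuple[str, int], int] = {(tf, 1): 0}
--     q = deque([(tf, 1, 0)])
--
--     while q:
--         node, sign_to_tf, depth = q.popleft()
--         if depth >= max_steps:
--             continue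
--         for src, esign in incoming.get(node, []):
--             new_sign = int(sign_to_tf * esign)
--             st = (src, new_sign)
--             nd = depth + 1
--             if st not in best or nd < best[st]:
--                 best[st] = nd
--                 q.append((src, new_sign, nd))
--     return best
-- ===== SOURCE B (Python) =====
-- def _bfs_upstream(incoming, tf, max_steps):
--     # Recursive level decomposition: compute the list of BFS levels (each level
--     # a list of newly discovered (node, sign) states), then number them into a dict.
--     def expand(frontier, seen, budget):
--         if budget == 0:
--             return []
--         new = []
--         for node, sign in frontier:
--             for src, esign in incoming.get(node, []):
--                 st = (src, int(sign * esign))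
--                 if st not in seen:
--                     seen.add(st)
--                     new.append(st)
--         return [new] + expand(new, seen, budget - 1) if new else []
--
--     start = (tf, 1)
--     lvls = [[start]] + expand([start], {start}, max(max_steps, 0))
--     return {st: d for d, lvl in enumerate(lvls) for st in lvl}
-- ===== Notes on version B (the rewrite author's own statement) =====
-- stated objective: alternative
-- what changed: A's while-loop over a depth-tagged deque that mutates the result dict during the search is replaced by a recursive level-decomposition: a recursive expand() returns the list of BFS levels (tracking visited states in a plain set, with no depths threaded through the search), and the result dict is assembled afterwards by enumerating the levels.
import Mathlib
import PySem

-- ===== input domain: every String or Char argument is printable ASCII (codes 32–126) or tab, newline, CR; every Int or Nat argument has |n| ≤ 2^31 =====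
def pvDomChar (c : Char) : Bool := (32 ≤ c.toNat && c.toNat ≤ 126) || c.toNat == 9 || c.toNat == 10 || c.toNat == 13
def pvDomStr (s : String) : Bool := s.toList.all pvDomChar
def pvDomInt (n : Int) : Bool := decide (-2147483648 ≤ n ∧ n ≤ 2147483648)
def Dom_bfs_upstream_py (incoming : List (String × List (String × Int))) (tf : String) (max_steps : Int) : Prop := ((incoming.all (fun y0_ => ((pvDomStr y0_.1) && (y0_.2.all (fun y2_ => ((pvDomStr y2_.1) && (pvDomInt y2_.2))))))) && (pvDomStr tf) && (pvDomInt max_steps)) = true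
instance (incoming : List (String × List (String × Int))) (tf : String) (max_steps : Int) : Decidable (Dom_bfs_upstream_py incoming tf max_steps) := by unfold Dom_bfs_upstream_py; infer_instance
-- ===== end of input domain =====

-- B replaces A's depth-tagged deque (result dict mutated during the search) by a recursive
-- level decomposition: expand() returns the list of BFS levels with a plain seen-set, and the
-- result dict is assembled afterwards by enumerating the levels. Alternative decomposition, same values.

-- ===== PORT A =====

-- incoming.get(node, []) : first-match association lookup (the Python dict has unique keys)
def pvGetIn (incoming : List (String × List (String × Int))) (node : String) : List (String × Int) :=
  ((incoming.find? (fun p => p.1 == node)).map (·.2)).getD []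

-- largest adjacency-list length, used only as a termination bound for pvLoopA
def pvMaxLen (incoming : List (String × List (String × Int))) : Nat :=
  incoming.foldr (fun p m => max p.2.length m) 0

-- inner `for src, esign in incoming.get(node, [])` loop of A: returns (best, entries appended to q)
def pvInnerA (best : PySem.Dict (String × Int) Int) (sign depth : Int) :
    List (String × Int) → PySem.Dict (String × Int) Int × List (String × Int × Int)
  | [] => (best, [])
  | (src, esign) :: rest =>
    let new_sign := sign * esign
    let st := (src, new_sign)
    let nd := depth + 1
    if !(best.contains st) || nd < best.getD st 0 then
      let r := pvInnerA (best.insert st nd) sign depth rest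
      (r.1, (src, new_sign, nd) :: r.2)
    else
      pvInnerA best sign depth rest

lemma pvInnerA_len (best : PySem.Dict (String × Int) Int) (sign depth : Int)
    (nbrs : List (String × Int)) : (pvInnerA best sign depth nbrs).2.length ≤ nbrs.length := by
  induction nbrs generalizing best with
  | nil => simp [pvInnerA]
  | cons hd tl ih =>
    simp only [pvInnerA]
    split
    · simpa using Nat.succ_le_succ (ih _)
    · exact Nat.le_succ_of_le (ih _)

lemma pvInnerA_depth (best : PySem.Dict (String × Int) Int) (sign depth : Int)
    (nbrs : List (String × Int)) :
    ∀ e ∈ (pvInnerA best sign depth nbrs).2, e.2.2 = depth + 1 := by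
  induction nbrs generalizing best with
  | nil => simp [pvInnerA]
  | cons hd tl ih =>
    simp only [pvInnerA]
    split
    · intro e he
      rcases List.mem_cons.1 he with h | h
      · simp [h]
      · exact ih _ e h
    · exact ih _

lemma pvGetIn_len (incoming : List (String × List (String × Int))) (node : String) :
    (pvGetIn incoming node).length ≤ pvMaxLen incoming := by
  induction incoming with
  | nil => simp [pvGetIn, pvMaxLen]
  | cons hd tl ih =>
    simp only [pvGetIn, pvMaxLen, List.find?, List.foldr] at *
    by_cases h : hd.1 == node
    · simp [h]
    · simp only [h]
      exact le_trans ih (Nat.le_max_right _ _)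

-- the strict decrease used by pvLoopA's termination proof
lemma pvMeasure_lt (S : Nat) (maxs depth : Int) (hd : ¬ depth ≥ maxs)
    (ents : List (String × Int × Int)) (hlen : ents.length ≤ S)
    (hdep : ∀ e ∈ ents, e.2.2 = depth + 1) :
    (ents.map (fun e => (S + 1) ^ ((maxs - e.2.2).toNat))).sum < (S + 1) ^ ((maxs - depth).toNat) := by
  have hmap : ents.map (fun e => (S + 1) ^ ((maxs - e.2.2).toNat))
      = ents.map (fun _ => (S + 1) ^ ((maxs - (depth + 1)).toNat)) := by
    apply List.map_congr_left
    intro e he; rw [hdep e he]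
  rw [hmap, List.map_const', List.sum_replicate, smul_eq_mul]
  have h1 : (maxs - depth).toNat = (maxs - (depth + 1)).toNat + 1 := by omega
  rw [h1, pow_succ]
  have hp : 0 < (S + 1) ^ ((maxs - (depth + 1)).toNat) := Nat.pow_pos (Nat.succ_pos S)
  calc ents.length * (S + 1) ^ ((maxs - (depth + 1)).toNat)
      ≤ S * (S + 1) ^ ((maxs - (depth + 1)).toNat) :=
        Nat.mul_le_mul_right _ hlen
    _ < (S + 1) ^ ((maxs - (depth + 1)).toNat) * (S + 1) := by nlinarith

-- A's `while q` loop (queue represented as a list; appends collected by pvInnerA)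
def pvLoopA (incoming : List (String × List (String × Int))) (max_steps : Int) :
    PySem.Dict (String × Int) Int → List (String × Int × Int) → PySem.Dict (String × Int) Int
  | best, [] => best
  | best, (node, sign, depth) :: q' =>
    if depth ≥ max_steps then pvLoopA incoming max_steps best q'
    else
      let r := pvInnerA best sign depth (pvGetIn incoming node)
      pvLoopA incoming max_steps r.1 (q' ++ r.2)
termination_by _ q => (q.map (fun e => (pvMaxLen incoming + 1) ^ ((max_steps - e.2.2).toNat))).sum
decreasing_by
  · simp only [List.map_cons, List.sum_cons]
    have : 1 ≤ (pvMaxLen incoming + 1) ^ ((max_steps - depth).toNat) :=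
      Nat.one_le_pow _ _ (Nat.succ_pos _)
    omega
  · simp only [List.map_cons, List.sum_cons, List.map_append, List.sum_append]
    have := pvMeasure_lt (pvMaxLen incoming) max_steps depth (by assumption)
      (pvInnerA best sign depth (pvGetIn incoming node)).2
      (le_trans (pvInnerA_len _ _ _ _) (pvGetIn_len incoming node))
      (pvInnerA_depth _ _ _ _)
    omega

def bfs_upstream_py (incoming : List (String × List (String × Int))) (tf : String) (max_steps : Int) : List (String × Int × Int) :=
  (pvLoopA incoming max_steps (PySem.Dict.empty.insert (tf, 1) 0)
    [(tf, (1 : Int), (0 : Int))]).items.map (fun p => (p.1.1, p.1.2, p.2))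

-- ===== PORT B =====

-- inner `for src, esign in incoming.get(node, [])` loop of expand(): threads (seen, new)
def pvInnerC (seen : PySem.Set (String × Int)) (nw : List (String × Int)) (sign : Int) :
    List (String × Int) → PySem.Set (String × Int) × List (String × Int)
  | [] => (seen, nw)
  | (src, esign) :: rest =>
    let st := (src, sign * esign)
    if PySem.Set.contains seen st then pvInnerC seen nw sign rest
    else pvInnerC (PySem.Set.add seen st) (nw ++ [st]) sign rest

-- the `for node, sign in frontier` loop of expand()
def pvLevelC (incoming : List (String × List (String × Int)))
    (seen : PySem.Set (String × Int)) (nw : List (String × Int)) :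
    List (String × Int) → PySem.Set (String × Int) × List (String × Int)
  | [] => (seen, nw)
  | (node, sign) :: rest =>
    let r := pvInnerC seen nw sign (pvGetIn incoming node)
    pvLevelC incoming r.1 r.2 rest

-- recursive expand(frontier, seen, budget): list of BFS levels after `frontier`
def pvExpand (incoming : List (String × List (String × Int))) :
    Nat → PySem.Set (String × Int) → List (String × Int) → List (List (String × Int))
  | 0, _, _ => []
  | budget + 1, seen, frontier =>
    let r := pvLevelC incoming seen [] frontier
    if r.2.isEmpty then [] else r.2 :: pvExpand incoming budget r.1 r.2

-- `{st: d for d, lvl in enumerate(lvls) for st in lvl}`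
def pvAssemble : PySem.Dict (String × Int) Int → Int → List (List (String × Int)) →
    PySem.Dict (String × Int) Int
  | d, _, [] => d
  | d, i, lvl :: rest => pvAssemble (lvl.foldl (fun dd st => dd.insert st i) d) (i + 1) rest

def bfs_upstream_py_alt (incoming : List (String × List (String × Int))) (tf : String) (max_steps : Int) : List (String × Int × Int) :=
  let start : String × Int := (tf, 1)
  let lvls := [start] :: pvExpand incoming (max max_steps 0).toNat (PySem.Set.ofList [start]) [start]
  (pvAssemble PySem.Dict.empty 0 lvls).items.map (fun p => (p.1.1, p.1.2, p.2))

-- ===== PRECONDITION & SPEC =====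
def Spec_bfs_upstream_py (incoming : List (String × List (String × Int))) (tf : String) (max_steps : Int) (out : List (String × Int × Int)) : Prop := out = bfs_upstream_py_alt incoming tf max_steps
instance (incoming : List (String × List (String × Int))) (tf : String) (max_steps : Int) (out : List (String × Int × Int)) : Decidable (Spec_bfs_upstream_py incoming tf max_steps out) := by unfold Spec_bfs_upstream_py; infer_instance

-- ===== CLAIM (what is proved, stated in full; the proofs are below) =====
def Claim_equal_bfs_upstream_py : Prop := ∀ (incoming : List (String × List (String × Int))) (tf : String) (max_steps : Int), Dom_bfs_upstream_py incoming tf max_steps → Spec_bfs_upstream_py incoming tf max_steps (bfs_upstream_py incoming tf max_steps)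

-- ===== LEMMAS AND PROOFS =====

-- invariant: every recorded depth in best is ≤ d
def pvInv (best : PySem.Dict (String × Int) Int) (d : Int) : Prop :=
  ∀ p ∈ best.items, p.2 ≤ d

-- invariant: best and seen have the same members
def pvSync (best : PySem.Dict (String × Int) Int) (seen : PySem.Set (String × Int)) : Prop :=
  ∀ st, best.contains st = PySem.Set.contains seen st

lemma pvInner_AC (sign depth : Int) (nbrs : List (String × Int))
    (best : PySem.Dict (String × Int) Int) (seen : PySem.Set (String × Int))
    (acc : List (String × Int))
    (hsync : pvSync best seen) (hinv : pvInv best (depth + 1)) :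
    (pvInnerC seen acc sign nbrs).2
      = acc ++ (pvInnerA best sign depth nbrs).2.map (fun e => (e.1, e.2.1)) ∧
    (pvInnerA best sign depth nbrs).1
      = ((pvInnerA best sign depth nbrs).2.map (fun e => (e.1, e.2.1))).foldl
          (fun dd st => dd.insert st (depth + 1)) best ∧
    pvSync (pvInnerA best sign depth nbrs).1 (pvInnerC seen acc sign nbrs).1 ∧
    pvInv (pvInnerA best sign depth nbrs).1 (depth + 1) := by
  induction nbrs generalizing best seen acc with
  | nil => exact ⟨by simp [pvInnerA, pvInnerC], by simp [pvInnerA], by simpa [pvInnerA, pvInnerC] using hsync, by simpa [pvInnerA] using hinv⟩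
  | cons hd tl ih =>
    obtain ⟨src, esign⟩ := hd
    simp only [pvInnerA, pvInnerC]
    by_cases hc : PySem.Set.contains seen (src, sign * esign)
    · have hbc : best.contains (src, sign * esign) = true := by rw [hsync]; exact hc
      have hle : best.getD (src, sign * esign) 0 ≤ depth + 1 := by
        have h : (best.get? (src, sign * esign)).isSome := by
          rw [← PySem.Dict.contains_eq_isSome_get?]; exact hbc
        cases hg : best.get? (src, sign * esign) with
        | none => simp [hg] at h
        | some v =>
          rw [PySem.Dict.getD_of_get?_eq_some best 0 hg]
          exact hinv _ (PySem.Dict.mem_items_of_get?_eq_some best hg)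
      have hnotlt : ¬ depth + 1 < best.getD (src, sign * esign) 0 := not_lt.mpr hle
      simp only [hc, hbc, hnotlt, Bool.not_true, Bool.false_or, decide_false, if_true,
        Bool.false_eq_true, if_false]
      exact ih best seen acc hsync hinv
    · have hbc : best.contains (src, sign * esign) = false := by
        rw [hsync]; exact Bool.not_eq_true _ ▸ (by simpa using hc)
      have hsync' : pvSync (best.insert (src, sign * esign) (depth + 1))
          (PySem.Set.add seen (src, sign * esign)) := by
        intro st
        rw [Bool.eq_iff_iff, PySem.Dict.contains_insert]
        simp only [Bool.or_eq_true, beq_iff_eq, hsync st, PySem.Set.contains_iff,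
          PySem.Set.mem_add]
        tauto
      have hinv' : pvInv (best.insert (src, sign * esign) (depth + 1)) (depth + 1) := by
        intro p hp
        rcases (PySem.Dict.mem_items_insert _ _ _ _).1 hp with h | ⟨h, _⟩
        · simp [h]
        · exact hinv _ h
      simp only [hbc, hc, Bool.not_false, Bool.true_or, if_true, Bool.false_eq_true, if_false]
      obtain ⟨h1, h2, h3, h4⟩ := ih (best.insert (src, sign * esign) (depth + 1))
        (PySem.Set.add seen (src, sign * esign)) (acc ++ [(src, sign * esign)]) hsync' hinv'
      refine ⟨by simp [h1], ?_, h3, h4⟩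
      simpa using h2

lemma pvLevel_AC (incoming : List (String × List (String × Int))) (max_steps depth : Int)
    (hlt : ¬ depth ≥ max_steps) (cur : List (String × Int)) :
    ∀ (best : PySem.Dict (String × Int) Int) (seen : PySem.Set (String × Int))
      (acc : List (String × Int)), pvSync best seen → pvInv best (depth + 1) →
    ∃ nw, (pvLevelC incoming seen acc cur).2 = acc ++ nw ∧
      pvSync (nw.foldl (fun dd st => dd.insert st (depth + 1)) best) (pvLevelC incoming seen acc cur).1 ∧
      pvInv (nw.foldl (fun dd st => dd.insert st (depth + 1)) best) (depth + 1) ∧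
      pvLoopA incoming max_steps best
          (cur.map (fun st => (st.1, st.2, depth)) ++ acc.map (fun st => (st.1, st.2, depth + 1)))
        = pvLoopA incoming max_steps (nw.foldl (fun dd st => dd.insert st (depth + 1)) best)
            ((acc ++ nw).map (fun st => (st.1, st.2, depth + 1))) := by
  induction cur with
  | nil =>
    intro best seen acc hsync hinv
    exact ⟨[], by simp [pvLevelC], by simpa using hsync, by simpa using hinv,
      by simp⟩
  | cons hd tl ih =>
    intro best seen acc hsync hinv
    obtain ⟨node, sign⟩ := hd
    obtain ⟨h1, h2, h3, h4⟩ := pvInner_AC sign depth (pvGetIn incoming node) best seen acc hsync hinv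
    set m := (pvInnerA best sign depth (pvGetIn incoming node)).2.map (fun e => (e.1, e.2.1)) with hm
    have hstep : pvLoopA incoming max_steps best
        (((node, sign) :: tl).map (fun st => (st.1, st.2, depth)) ++ acc.map (fun st => (st.1, st.2, depth + 1)))
        = pvLoopA incoming max_steps (pvInnerA best sign depth (pvGetIn incoming node)).1
          (tl.map (fun st => (st.1, st.2, depth))
            ++ (acc ++ m).map (fun st => (st.1, st.2, depth + 1))) := by
      rw [List.map_cons, List.cons_append, pvLoopA]
      simp only [hlt, if_false]
      congr 1
      rw [List.map_append, List.append_assoc]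
      congr 2
      rw [hm, List.map_map]
      conv_lhs => rw [← List.map_id ((pvInnerA best sign depth (pvGetIn incoming node)).2)]
      apply List.map_congr_left
      intro e he
      have hd := pvInnerA_depth best sign depth (pvGetIn incoming node) e he
      obtain ⟨a, b, c⟩ := e
      simp only at hd
      simp only [Function.comp_apply, id_eq, Prod.mk.injEq, true_and]
      omega
    obtain ⟨nw', e1, e2, e3, e4⟩ := ih (pvInnerA best sign depth (pvGetIn incoming node)).1
      (pvInnerC seen acc sign (pvGetIn incoming node)).1 (acc ++ m) h3 h4
    refine ⟨m ++ nw', ?_, ?_, ?_, ?_⟩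
    · simp only [pvLevelC, h1]
      rw [e1, List.append_assoc]
    · simpa only [pvLevelC, h1, List.foldl_append, ← h2] using e2
    · simpa only [List.foldl_append, ← h2] using e3
    · rw [hstep, h2] at *
      rw [e4, List.foldl_append, ← List.append_assoc]
  
lemma pvLoopA_drain (incoming : List (String × List (String × Int))) (max_steps : Int)
    (q : List (String × Int × Int)) (best : PySem.Dict (String × Int) Int)
    (h : ∀ e ∈ q, max_steps ≤ e.2.2) :
    pvLoopA incoming max_steps best q = best := by
  induction q with
  | nil => rw [pvLoopA]
  | cons e q' ih =>
    obtain ⟨node, sign, depth⟩ := e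
    rw [pvLoopA]
    have : depth ≥ max_steps := h (node, sign, depth) (List.mem_cons_self)
    simp only [this, if_true]
    exact ih (fun e he => h e (List.mem_cons_of_mem _ he))

lemma pvLoop_AC (incoming : List (String × List (String × Int))) (max_steps : Int) :
    ∀ (k : Nat) (depth : Int) (best : PySem.Dict (String × Int) Int)
      (seen : PySem.Set (String × Int)) (frontier : List (String × Int)),
    k = (max_steps - depth).toNat → pvInv best depth → pvSync best seen →
    pvLoopA incoming max_steps best (frontier.map (fun st => (st.1, st.2, depth)))
      = pvAssemble best (depth + 1) (pvExpand incoming k seen frontier) := by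
  intro k
  induction k with
  | zero =>
    intro depth best seen frontier hk hinv hsync
    rw [pvExpand, pvAssemble, pvLoopA_drain]
    intro e he
    simp only [List.mem_map] at he
    obtain ⟨st, _, rfl⟩ := he
    show max_steps ≤ depth
    omega
  | succ k ih =>
    intro depth best seen frontier hk hinv hsync
    have hlt : ¬ depth ≥ max_steps := by omega
    have hinv1 : pvInv best (depth + 1) := fun p hp => le_trans (hinv p hp) (by omega)
    obtain ⟨nw, e1, e2, e3, e4⟩ := pvLevel_AC incoming max_steps depth hlt frontier best seen [] hsync hinv1
    simp only [List.map_nil, List.append_nil] at e4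
    rw [pvExpand]
    simp only [List.nil_append] at e1 e4
    simp only [e1]
    by_cases hne : nw = []
    · subst hne
      simp only [List.isEmpty_nil, if_true, pvAssemble]
      rw [e4]
      simp [pvLoopA, List.foldl_nil]
    · have : nw.isEmpty = false := by simp [hne]
      simp only [this, Bool.false_eq_true, if_false, pvAssemble]
      rw [e4, ih (depth + 1) _ _ nw (by omega) e3 e2]

-- ===== VERDICT (by name: the statement is the Claim_ definition above) =====
theorem bfs_upstream_py_spec : Claim_equal_bfs_upstream_py := by
  intro incoming tf max_steps _
  unfold Spec_bfs_upstream_py bfs_upstream_py bfs_upstream_py_alt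
  have hinv : pvInv (PySem.Dict.empty.insert ((tf, 1) : String × Int) (0 : Int)) 0 := by
    intro p hp
    rcases (PySem.Dict.mem_items_insert _ _ _ _).1 hp with h | ⟨h, _⟩
    · simp [h]
    · simp only [PySem.Dict.empty] at h
      exact absurd h (List.not_mem_nil)
  have hsync : pvSync (PySem.Dict.empty.insert ((tf, 1) : String × Int) (0 : Int))
      (PySem.Set.ofList [((tf, 1) : String × Int)]) := by
    intro st
    rw [Bool.eq_iff_iff, PySem.Dict.contains_insert]
    simp [PySem.Set.mem_ofList]
  have hmax : (max max_steps 0).toNat = (max_steps - 0).toNat := by omega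
  have := pvLoop_AC incoming max_steps (max max_steps 0).toNat 0
    (PySem.Dict.empty.insert (tf, 1) 0) (PySem.Set.ofList [(tf, 1)]) [(tf, 1)] hmax hinv hsync
  simp only [List.map_cons, List.map_nil] at this
  rw [this]
  simp [pvAssemble]
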